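-- pv_equiv track=rewrite | github.com/rubentalstra/pyopenehr-am | openehr_am/validation/issue.py | validate_issue_code
-- ===== SOURCE A (Python) =====
-- _ISSUE_CODE_RANGES: dict[str, tuple[int, int]] = {
--     "ADL": (1, 199),
--     "ODN": (100, 199),
--     "AQL": (100, 199),
--     "AOM": (200, 499),
--     "BMM": (500, 699),
--     "OPT": (700, 899),
--     "PATH": (900, 999),
--     "CLI": (1, 199),
-- }
--
-- def validate_issue_code(code: str) -> bool:
--     """Return True if `code` matches the project Issue-code scheme.
--
--     This enforces the prefix set and recommended numeric ranges documented in
--     `docs/issue-codes.md`.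
--     """
--
--     if not code:
--         return False
--
--     # Split into alpha prefix + 3 digit suffix, without regex.
--     prefix_end = 0
--     for ch in code:
--         if ch.isalpha():
--             prefix_end += 1
--             continue
--         break
--
--     prefix = code[:prefix_end]
--     digits = code[prefix_end:]
--
--     if not prefix or not digits:
--         return False
--
--     if prefix != prefix.upper():
--         return False
--
--     if prefix not in _ISSUE_CODE_RANGES:
--         return False
--
--     if len(digits) != 3 or not digits.isdigit():
--         return False
--
--     number = int(digits)
--     low, high = _ISSUE_CODE_RANGES[prefix]
--     return low <= number <= high
-- ===== SOURCE B (Python) =====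
-- _ISSUE_CODE_RANGES: dict[str, tuple[int, int]] = {
--     "ADL": (1, 199),
--     "ODN": (100, 199),
--     "AQL": (100, 199),
--     "AOM": (200, 499),
--     "BMM": (500, 699),
--     "OPT": (700, 899),
--     "PATH": (900, 999),
--     "CLI": (1, 199),
-- }
--
-- def validate_issue_code(code: str) -> bool:
--     """Fixed-width split: the valid codes are exactly <known prefix> + 3 digits,
--     so look the leading part (all but the last three chars) up directly."""
--     rng = _ISSUE_CODE_RANGES.get(code[:-3])
--     if rng is None:
--         return False
--     digits = code[-3:]
--     if not digits.isdigit():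
--         return False
--     low, high = rng
--     return low <= int(digits) <= high
-- ===== Notes on version B (the rewrite author's own statement) =====
-- stated objective: simpler
-- what changed: B removes A's character-by-character alpha-scanning loop and its chain of guards: since valid codes are exactly a known prefix plus a 3-digit suffix, B splits the string at a fixed position (code[:-3] / code[-3:]) and does one dictionary lookup on the leading part, keeping only the isdigit and range checks.
import Mathlib
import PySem

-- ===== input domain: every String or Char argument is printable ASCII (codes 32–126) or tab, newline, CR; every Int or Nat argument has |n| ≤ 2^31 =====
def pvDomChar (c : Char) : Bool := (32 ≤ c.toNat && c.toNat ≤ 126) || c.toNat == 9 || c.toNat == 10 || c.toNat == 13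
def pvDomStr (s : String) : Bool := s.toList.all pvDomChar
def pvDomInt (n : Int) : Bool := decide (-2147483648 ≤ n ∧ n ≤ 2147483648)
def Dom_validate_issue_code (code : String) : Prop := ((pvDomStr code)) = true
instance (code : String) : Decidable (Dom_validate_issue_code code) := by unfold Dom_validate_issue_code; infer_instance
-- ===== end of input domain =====

-- B replaces A's alpha-scanning loop by a fixed split at the last three characters
-- plus a single dictionary lookup of the leading part (objective: simpler).

-- the module constant _ISSUE_CODE_RANGES (shared context of both implementations)
def pvIssueCodeRanges : PySem.Dict String (Int × Int) :=
  ⟨[("ADL", (1, 199)), ("ODN", (100, 199)), ("AQL", (100, 199)), ("AOM", (200, 499)),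
    ("BMM", (500, 699)), ("OPT", (700, 899)), ("PATH", (900, 999)), ("CLI", (1, 199))]⟩

-- ===== PORT A =====
-- A's for-loop over code with break: prefix_end counts the leading alphabetic run
def pvPrefixEnd : List Char → Nat
  | [] => 0
  | c :: cs => if PySem.Chars.isalpha c then pvPrefixEnd cs + 1 else 0

def validate_issue_code (code : String) : Bool :=
  if code = "" then false
  else
    let prefix_end : Nat := pvPrefixEnd code.toList
    let pfx : String := PySem.Str.slice code none (some (prefix_end : Int))
    let digits : String := PySem.Str.slice code (some (prefix_end : Int)) none
    if pfx = "" ∨ digits = "" then false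
    else if pfx ≠ PySem.Str.upper pfx then false
    else if pvIssueCodeRanges.contains pfx = false then false
    else if PySem.Str.len digits ≠ 3 ∨ PySem.Str.strIsdigit digits = false then false
    else
      -- int(digits): ValueError is impossible here (digits.isdigit() already held on ASCII)
      match PySem.Int.ofStr? digits with
      | none => false
      | some number =>
        match pvIssueCodeRanges.get? pfx with
        | none => false  -- unreachable: the membership test above succeeded
        | some (low, high) => decide (low ≤ number ∧ number ≤ high)

-- ===== PORT B =====
def validate_issue_code_alt (code : String) : Bool :=
  match pvIssueCodeRanges.get? (PySem.Str.slice code none (some (-3))) with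
  | none => false
  | some (low, high) =>
    let digits : String := PySem.Str.slice code (some (-3)) none
    if PySem.Str.strIsdigit digits = false then false
    else
      -- int(digits): ValueError is impossible here (digits.isdigit() already held on ASCII)
      match PySem.Int.ofStr? digits with
      | none => false
      | some number => decide (low ≤ number ∧ number ≤ high)

-- ===== PRECONDITION & SPEC =====
def Spec_validate_issue_code (code : String) (out : Bool) : Prop := out = validate_issue_code_alt code
instance (code : String) (out : Bool) : Decidable (Spec_validate_issue_code code out) := by unfold Spec_validate_issue_code; infer_instance

-- ===== CLAIM (what is proved, stated in full; the proofs are below) =====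
def Claim_equal_validate_issue_code : Prop := ∀ (code : String), Dom_validate_issue_code code → Spec_validate_issue_code code (validate_issue_code code)

-- ===== LEMMAS AND PROOFS =====

theorem pvPrefixEnd_eq (cs : List Char) :
    pvPrefixEnd cs = (cs.takeWhile PySem.Chars.isalpha).length := by
  induction cs with
  | nil => rfl
  | cons c cs ih =>
    by_cases h : PySem.Chars.isalpha c = true
    · simp [pvPrefixEnd, List.takeWhile, h, ih]
    · simp [pvPrefixEnd, List.takeWhile, h]

theorem pv_digit_not_alpha (c : Char) (h : PySem.Chars.isdigit c = true) :
    PySem.Chars.isalpha c = false := by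
  simp only [PySem.Chars.isdigit, Bool.and_eq_true, decide_eq_true_eq, Char.le_def,
    UInt32.le_iff_toNat_le] at h
  simp only [PySem.Chars.isalpha, PySem.Chars.isupper, PySem.Chars.islower,
    Bool.or_eq_false_iff, Bool.and_eq_false_iff, decide_eq_false_iff_not, Char.le_def,
    UInt32.le_iff_toNat_le]
  have h0 : ('0' : Char).val.toNat = 48 := rfl
  have h9 : ('9' : Char).val.toNat = 57 := rfl
  have hA : ('A' : Char).val.toNat = 65 := rfl
  have hZ : ('Z' : Char).val.toNat = 90 := rfl
  have ha : ('a' : Char).val.toNat = 97 := rfl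
  have hz : ('z' : Char).val.toNat = 122 := rfl
  omega

theorem pv_takeWhile_append (p : Char → Bool) (xs : List Char) (y : Char) (ys : List Char)
    (hxs : ∀ x ∈ xs, p x = true) (hy : p y = false) :
    (xs ++ y :: ys).takeWhile p = xs := by
  induction xs with
  | nil => simp [hy]
  | cons a as ih =>
    have := hxs a (by simp)
    simp only [List.cons_append, List.takeWhile, this]
    simp [ih (fun x hx => hxs x (by simp [hx]))]

theorem pv_slices_eq (code : String) (hn : pvPrefixEnd code.toList = code.toList.length - 3)
    (hL : 3 ≤ code.toList.length) :
    PySem.Str.slice code none (some (-3)) = PySem.Str.slice code none (some (pvPrefixEnd code.toList : Int)) ∧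
    PySem.Str.slice code (some (-3)) = PySem.Str.slice code (some (pvPrefixEnd code.toList : Int)) := by
  constructor <;> apply String.toList_inj.mp <;>
    simp only [PySem.Str.slice, String.toList_ofList, PySem.Chars.slice_eq_listSlice]
  · rw [PySem.List.slice_to_neg_ofNat _ 3 (by omega), PySem.List.slice_to_natCast, hn]
  · rw [PySem.List.slice_from_neg_ofNat _ 3 (by omega), PySem.List.slice_from_natCast, hn]

theorem pv_backward_case (code : String) (key : String) (low high number : Int)
    (hkey_alpha : key.toList.all PySem.Chars.isalpha = true)
    (hkey_upper : PySem.Str.upper key = key)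
    (hkey_mem : pvIssueCodeRanges.contains key = true)
    (hkey_get : pvIssueCodeRanges.get? key = some (low, high))
    (hkey_ne : key.toList ≠ [])
    (hk : PySem.Str.slice code none (some (-3)) = key)
    (hdig : PySem.Str.strIsdigit (PySem.Str.slice code (some (-3))) = true)
    (hnum : PySem.Int.ofStr? (PySem.Str.slice code (some (-3))) = some number)
    (hbounds : low ≤ number ∧ number ≤ high) :
    validate_issue_code code = true := by
  have hkl : code.toList.take (code.toList.length - 3) = key.toList := by
    have := congrArg String.toList hk
    simpa [PySem.Str.slice, PySem.List.slice_to_neg_ofNat _ 3 (by omega)] using this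
  have hklen : code.toList.length - 3 = key.toList.length := by
    have := congrArg List.length hkl
    rw [List.length_take] at this
    omega
  have hL : 4 ≤ code.toList.length := by
    have : 1 ≤ key.toList.length := List.length_pos_of_ne_nil hkey_ne
    omega
  have hdsl : (PySem.Str.slice code (some (-3))).toList = code.toList.drop (code.toList.length - 3) := by
    simp [PySem.Str.slice, PySem.List.slice_from_neg_ofNat _ 3 (by omega)]
  have hds : code.toList.drop (code.toList.length - 3) ≠ [] ∧
      (code.toList.drop (code.toList.length - 3)).all PySem.Chars.isdigit = true := by
    have := hdig
    simp only [PySem.Str.strIsdigit, PySem.Chars.strIsdigit, hdsl, Bool.and_eq_true] at this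
    exact ⟨by simpa using this.1, this.2⟩
  have hn : pvPrefixEnd code.toList = code.toList.length - 3 := by
    rw [pvPrefixEnd_eq]
    conv_lhs => rw [← List.take_append_drop (code.toList.length - 3) code.toList]
    obtain ⟨hne, hall⟩ := hds
    obtain ⟨d, rest, hdr⟩ := List.exists_cons_of_ne_nil hne
    rw [hdr, pv_takeWhile_append]
    · rw [List.length_take]; omega
    · intro x hx
      rw [hkl] at hx
      exact List.all_eq_true.mp hkey_alpha x (by simpa using hx)
    · apply pv_digit_not_alpha
      have := List.all_eq_true.mp hall d (by rw [hdr]; simp)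
      simpa using this
  obtain ⟨e1, e2⟩ := pv_slices_eq code hn (by omega)
  have hcne : code ≠ "" := by
    intro h; subst h; simp at hL
  have hpfx : PySem.Str.slice code none (some (pvPrefixEnd code.toList : Int)) = key := by
    rw [← e1, hk]
  have hdgs : PySem.Str.slice code (some (pvPrefixEnd code.toList : Int)) =
      PySem.Str.slice code (some (-3)) := e2.symm
  have hkne' : key ≠ "" := by
    intro h; apply hkey_ne; rw [h]; rfl
  have hdne : PySem.Str.slice code (some (-3)) ≠ "" := by
    intro h
    have := congrArg String.toList h
    rw [hdsl] at this
    exact hds.1 (by simpa using this)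
  have hlen3 : PySem.Str.len (PySem.Str.slice code (some (-3))) = 3 := by
    simp only [PySem.Str.len, hdsl, List.length_drop]
    omega
  have hdig2 : PySem.Chars.strIsdigit (PySem.List.slice code.toList (some (-3)) none) = true := by
    have he : PySem.List.slice code.toList (some (-3)) none =
        (PySem.Str.slice code (some (-3))).toList := by
      rw [hdsl, PySem.List.slice_from_neg_ofNat _ 3 (by omega)]
    rw [he]
    simpa [PySem.Str.strIsdigit] using hdig
  simp only [validate_issue_code, if_neg hcne, hpfx, hdgs, hlen3, hnum, hkey_get]
  simp [hkne', hdne, hkey_upper, hkey_mem, hdig2, hbounds.1, hbounds.2]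
theorem pv_A_eq_B (code : String) : validate_issue_code code = validate_issue_code_alt code := by
  rw [Bool.eq_iff_iff]
  constructor
  · intro hA
    simp only [validate_issue_code] at hA
    by_cases hempty : code = ""
    · simp [hempty] at hA
    simp only [if_neg hempty] at hA
    split at hA
    · exact absurd hA (by simp)
    split at hA
    · exact absurd hA (by simp)
    split at hA
    · exact absurd hA (by simp)
    split at hA
    · exact absurd hA (by simp)
    split at hA
    · exact absurd hA (by simp)
    split at hA
    · exact absurd hA (by simp)
    rename_i h2 h3 h4 h5 _ number hnum _ low high hget
    push_neg at h5
    obtain ⟨hlen, hdig⟩ := h5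
    have hnle : pvPrefixEnd code.toList ≤ code.toList.length := by
      rw [pvPrefixEnd_eq]; exact (List.takeWhile_sublist _).length_le
    have hlen' : (code.toList.drop (pvPrefixEnd code.toList)).length = 3 := by
      have := hlen
      simp only [PySem.Str.len, PySem.Str.slice, String.toList_ofList,
        PySem.Chars.slice_eq_listSlice, PySem.List.slice_from_natCast] at this
      exact_mod_cast this
    rw [List.length_drop] at hlen'
    have hn : pvPrefixEnd code.toList = code.toList.length - 3 := by omega
    obtain ⟨e1, e2⟩ := pv_slices_eq code hn (by omega)
    have hdig' : PySem.Chars.strIsdigit (code.toList.drop (pvPrefixEnd code.toList)) = true := by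
      have := hdig
      simp only [PySem.Str.strIsdigit, PySem.Str.slice, String.toList_ofList,
        PySem.Chars.slice_eq_listSlice, PySem.List.slice_from_natCast] at this
      simpa using this
    simp only [validate_issue_code_alt, e1, e2, hget, hnum]
    simp [hA, hdig']
  · intro hB
    simp only [validate_issue_code_alt] at hB
    split at hB
    · exact absurd hB (by simp)
    rename_i x low high hget
    split at hB
    · exact absurd hB (by simp)
    rename_i hdigf
    split at hB
    · exact absurd hB (by simp)
    rename_i num hnum
    have hdig : PySem.Str.strIsdigit (PySem.Str.slice code (some (-3))) = true := by
      simpa using hdigf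
    have hbounds : low ≤ num ∧ num ≤ high := of_decide_eq_true hB
    have hget' := hget
    simp only [pvIssueCodeRanges, PySem.Dict.get?, List.find?_cons] at hget'
    split at hget'
    · rename_i hbeq
      simp only [Option.map_some, Option.some.injEq, Prod.mk.injEq] at hget'
      obtain ⟨hlow, hhigh⟩ := hget'
      subst hlow; subst hhigh
      exact pv_backward_case code "ADL" _ _ num (by decide) (by decide) (by decide) (by decide)
        (by decide) (eq_of_beq hbeq).symm hdig hnum hbounds
    split at hget'
    · rename_i hbeq
      simp only [Option.map_some, Option.some.injEq, Prod.mk.injEq] at hget'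
      obtain ⟨hlow, hhigh⟩ := hget'
      subst hlow; subst hhigh
      exact pv_backward_case code "ODN" _ _ num (by decide) (by decide) (by decide) (by decide)
        (by decide) (eq_of_beq hbeq).symm hdig hnum hbounds
    split at hget'
    · rename_i hbeq
      simp only [Option.map_some, Option.some.injEq, Prod.mk.injEq] at hget'
      obtain ⟨hlow, hhigh⟩ := hget'
      subst hlow; subst hhigh
      exact pv_backward_case code "AQL" _ _ num (by decide) (by decide) (by decide) (by decide)
        (by decide) (eq_of_beq hbeq).symm hdig hnum hbounds
    split at hget'
    · rename_i hbeq
      simp only [Option.map_some, Option.some.injEq, Prod.mk.injEq] at hget'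
      obtain ⟨hlow, hhigh⟩ := hget'
      subst hlow; subst hhigh
      exact pv_backward_case code "AOM" _ _ num (by decide) (by decide) (by decide) (by decide)
        (by decide) (eq_of_beq hbeq).symm hdig hnum hbounds
    split at hget'
    · rename_i hbeq
      simp only [Option.map_some, Option.some.injEq, Prod.mk.injEq] at hget'
      obtain ⟨hlow, hhigh⟩ := hget'
      subst hlow; subst hhigh
      exact pv_backward_case code "BMM" _ _ num (by decide) (by decide) (by decide) (by decide)
        (by decide) (eq_of_beq hbeq).symm hdig hnum hbounds
    split at hget'
    · rename_i hbeq
      simp only [Option.map_some, Option.some.injEq, Prod.mk.injEq] at hget'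
      obtain ⟨hlow, hhigh⟩ := hget'
      subst hlow; subst hhigh
      exact pv_backward_case code "OPT" _ _ num (by decide) (by decide) (by decide) (by decide)
        (by decide) (eq_of_beq hbeq).symm hdig hnum hbounds
    split at hget'
    · rename_i hbeq
      simp only [Option.map_some, Option.some.injEq, Prod.mk.injEq] at hget'
      obtain ⟨hlow, hhigh⟩ := hget'
      subst hlow; subst hhigh
      exact pv_backward_case code "PATH" _ _ num (by decide) (by decide) (by decide) (by decide)
        (by decide) (eq_of_beq hbeq).symm hdig hnum hbounds
    split at hget'
    · rename_i hbeq
      simp only [Option.map_some, Option.some.injEq, Prod.mk.injEq] at hget'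
      obtain ⟨hlow, hhigh⟩ := hget'
      subst hlow; subst hhigh
      exact pv_backward_case code "CLI" _ _ num (by decide) (by decide) (by decide) (by decide)
        (by decide) (eq_of_beq hbeq).symm hdig hnum hbounds
    exact absurd hget' (by simp)

-- ===== VERDICT (by name: the statement is the Claim_ definition above) =====
theorem validate_issue_code_spec : Claim_equal_validate_issue_code := by
  intro code _
  unfold Spec_validate_issue_code
  exact pv_A_eq_B code
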